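-- pv_equiv track=rewrite | github.com/yaswanth-iitkgp/DepNeCTI | Evaluation/Eval_USS_LSS.py | comps_from_relations
-- ===== SOURCE A (Python) =====
-- def comps_from_relations(relations):
--     lst = []
--     nested_comp = []
--     for rel in relations:
--         if 'Comp_root' in rel:
--             lst.append(rel)
--             nested_comp.append(lst)
--             lst = []
--         else:
--             lst.append(rel)
--     return nested_comp
-- ===== SOURCE B (Python) =====
-- def comps_from_relations(relations):
--     boundaries = [i for i, rel in enumerate(relations) if 'Comp_root' in rel]
--     out = []
--     prev = 0
--     for i in boundaries:
--         out.append(relations[prev:i + 1])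
--         prev = i + 1
--     return out
-- ===== Notes on version B (the rewrite author's own statement) =====
-- stated objective: alternative
-- what changed: Replaces the running-sublist accumulator (append-and-reset on each 'Comp_root' hit) by first collecting the boundary indices with one enumerate pass and then emitting the groups as slices between consecutive boundaries.
import Mathlib
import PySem

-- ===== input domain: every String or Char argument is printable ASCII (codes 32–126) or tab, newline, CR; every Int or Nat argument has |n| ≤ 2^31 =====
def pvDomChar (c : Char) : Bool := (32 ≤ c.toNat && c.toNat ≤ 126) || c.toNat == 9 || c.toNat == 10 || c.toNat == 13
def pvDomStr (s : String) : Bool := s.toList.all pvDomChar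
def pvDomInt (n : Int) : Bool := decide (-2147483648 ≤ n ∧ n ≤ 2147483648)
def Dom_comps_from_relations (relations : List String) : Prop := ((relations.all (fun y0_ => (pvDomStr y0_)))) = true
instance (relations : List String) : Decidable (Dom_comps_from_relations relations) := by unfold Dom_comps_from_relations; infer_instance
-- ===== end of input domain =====

-- B restates A's grouping as boundary indices + slices between them: an alternative decomposition, same cost.

-- ===== PORT A =====
-- A's for-loop over relations carrying the running sublist `lst` and the output `nested_comp`.
def compsLoopA : List String → List String → List (List String) → List (List String)
  | [], _, acc => acc
  | r :: rest, lst, acc =>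
    if PySem.Str.isIn "Comp_root" r then compsLoopA rest [] (acc ++ [lst ++ [r]])
    else compsLoopA rest (lst ++ [r]) acc

def comps_from_relations (relations : List String) : List (List String) :=
  compsLoopA relations [] []

-- ===== PORT B =====
-- boundaries = [i for i, rel in enumerate(relations) if 'Comp_root' in rel]
def compsBoundaries (relations : List String) : List Int :=
  ((PySem.List.enumerate relations 0).filter (fun p => PySem.Str.isIn "Comp_root" p.2)).map (fun p => p.1)

-- the for-loop over boundaries carrying `prev`, appending relations[prev:i+1]
def compsBuild (relations : List String) (prev : Int) : List Int → List (List String)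
  | [] => []
  | i :: rest => PySem.List.slice relations (some prev) (some (i + 1)) :: compsBuild relations (i + 1) rest

def comps_from_relations_alt (relations : List String) : List (List String) :=
  compsBuild relations 0 (compsBoundaries relations)

-- ===== PRECONDITION & SPEC =====
def Spec_comps_from_relations (relations : List String) (out : List (List String)) : Prop := out = comps_from_relations_alt relations
instance (relations : List String) (out : List (List String)) : Decidable (Spec_comps_from_relations relations out) := by unfold Spec_comps_from_relations; infer_instance

-- ===== CLAIM (what is proved, stated in full; the proofs are below) =====
def Claim_equal_comps_from_relations : Prop := ∀ (relations : List String), Dom_comps_from_relations relations → Spec_comps_from_relations relations (comps_from_relations relations)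

-- ===== LEMMAS AND PROOFS =====

theorem enum_shift {α : Type} (xs : List α) (s : Int) :
    PySem.List.enumerate xs (s + 1) = (PySem.List.enumerate xs s).map (fun p => (p.1 + 1, p.2)) := by
  induction xs generalizing s with
  | nil => simp [PySem.List.enumerate_nil]
  | cons x xs ih => simp [PySem.List.enumerate_cons, ih]

theorem shift_filter_map (q : String → Bool) (l : List (Int × String)) :
    (((l.map (fun p => (p.1 + 1, p.2))).filter (fun p => q p.2)).map (fun p => p.1))
      = ((l.filter (fun p => q p.2)).map (fun p => p.1)).map (· + 1) := by
  induction l with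
  | nil => simp
  | cons p l ih => by_cases hq : q p.2 <;> simp [hq, ih]

theorem boundaries_cons (r : String) (rest : List String) :
    compsBoundaries (r :: rest) =
      (if PySem.Str.isIn "Comp_root" r then [(0 : Int)] else []) ++ (compsBoundaries rest).map (· + 1) := by
  unfold compsBoundaries
  rw [PySem.List.enumerate_cons, enum_shift, List.filter_cons]
  by_cases hq : PySem.Str.isIn "Comp_root" r
  · rw [if_pos (by exact hq), List.map_cons,
      shift_filter_map (fun s => PySem.Str.isIn "Comp_root" s), if_pos (by exact hq)]
    simp
  · rw [if_neg (by exact hq),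
      shift_filter_map (fun s => PySem.Str.isIn "Comp_root" s), if_neg (by exact hq)]
    simp

theorem boundaries_nonneg (rels : List String) : ∀ i ∈ compsBoundaries rels, 0 ≤ i := by
  intro i hi
  unfold compsBoundaries at hi
  simp only [List.mem_map, List.mem_filter] at hi
  obtain ⟨p, ⟨hp, _⟩, rfl⟩ := hi
  rw [PySem.List.mem_enumerate_iff] at hp
  obtain ⟨k, hk, rfl⟩ := hp
  simp

theorem build_shift (idxs : List Int) (r : String) (rels : List String) (prev : Int)
    (hp : 0 ≤ prev) (hi : ∀ i ∈ idxs, 0 ≤ i) :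
    compsBuild (r :: rels) (prev + 1) (idxs.map (· + 1)) = compsBuild rels prev idxs := by
  induction idxs generalizing prev with
  | nil => simp [compsBuild]
  | cons i rest ih =>
    have h0 : (0 : Int) ≤ i := hi i (by simp)
    simp only [List.map_cons, compsBuild]
    rw [PySem.List.slice_toNat (r :: rels) (by omega) (by omega),
        PySem.List.slice_toNat rels hp (by omega)]
    have h1 : (prev + 1).toNat = prev.toNat + 1 := by omega
    have h2 : (i + 1 + 1).toNat = (i + 1).toNat + 1 := by omega
    rw [h1, h2]
    simp only [List.drop_succ_cons]
    have h3 : (i + 1).toNat + 1 - (prev.toNat + 1) = (i + 1).toNat - prev.toNat := by omega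
    rw [h3, ih (i + 1) (by omega) (fun j hj => hi j (by simp [hj]))]

theorem loopA_acc (rels : List String) : ∀ lst acc,
    compsLoopA rels lst acc = acc ++ compsLoopA rels lst [] := by
  induction rels with
  | nil => intro lst acc; simp [compsLoopA]
  | cons r rest ih =>
    intro lst acc
    by_cases h : PySem.Str.isIn "Comp_root" r
    · simp only [compsLoopA, h, if_true, List.nil_append]
      rw [ih [] (acc ++ [lst ++ [r]]), ih [] [lst ++ [r]]]
      simp
    · simp only [compsLoopA, h]
      exact ih (lst ++ [r]) acc

theorem loopA_eq_build (rels : List String) : ∀ pfx : List String,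
    compsLoopA rels pfx [] =
      (match comps_from_relations_alt rels with
       | [] => []
       | s :: ss => (pfx ++ s) :: ss) := by
  induction rels with
  | nil =>
    intro pfx
    simp [compsLoopA, comps_from_relations_alt, compsBoundaries, compsBuild,
      PySem.List.enumerate_nil]
  | cons r rest ih =>
    intro pfx
    by_cases h : PySem.Str.isIn "Comp_root" r
    · simp only [compsLoopA, h, if_true, List.nil_append]
      rw [loopA_acc, ih []]
      have hr : comps_from_relations_alt (r :: rest) = [r] :: comps_from_relations_alt rest := by
        unfold comps_from_relations_alt
        rw [boundaries_cons, if_pos h]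
        simp only [List.singleton_append, compsBuild]
        rw [build_shift _ _ _ 0 le_rfl (boundaries_nonneg rest)]
        rw [PySem.List.slice_toNat (r :: rest) (by omega) (by omega)]
        simp
      rw [hr]
      cases hB : comps_from_relations_alt rest <;> simp
    · simp only [compsLoopA, h]
      rw [ih (pfx ++ [r])]
      have hb : comps_from_relations_alt (r :: rest) =
          compsBuild (r :: rest) 0 ((compsBoundaries rest).map (· + 1)) := by
        unfold comps_from_relations_alt
        rw [boundaries_cons, if_neg h, List.nil_append]
      rw [hb]
      cases hB : compsBoundaries rest with
      | nil =>
        unfold comps_from_relations_alt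
        rw [hB]
        simp [compsBuild]
      | cons i is =>
        have h0 : (0 : Int) ≤ i := boundaries_nonneg rest i (by rw [hB]; simp)
        have his : ∀ j ∈ is, (0 : Int) ≤ j := fun j hj => boundaries_nonneg rest j (by rw [hB]; simp [hj])
        unfold comps_from_relations_alt
        rw [hB]
        simp only [List.map_cons, compsBuild]
        rw [build_shift _ _ _ (i + 1) (by omega) his]
        rw [PySem.List.slice_toNat (r :: rest) (by omega) (by omega),
            PySem.List.slice_toNat rest (by omega) (by omega)]
        have h2 : (i + 1 + 1).toNat = (i + 1).toNat + 1 := by omega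
        rw [h2]
        simp [List.take_succ_cons]

-- ===== VERDICT (by name: the statement is the Claim_ definition above) =====
theorem comps_from_relations_spec : Claim_equal_comps_from_relations := by
  intro relations _
  unfold Spec_comps_from_relations comps_from_relations
  rw [loopA_eq_build relations []]
  cases h : comps_from_relations_alt relations <;> simp
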